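-- pv_equiv track=rewrite | github.com/jenna-my/dsc80-sp20 | labs/lab01/lab01.py | same_diff_ints
-- ===== SOURCE A (Python) =====
-- def same_diff_ints(ints):
--     """
--     same_diff_ints tests whether a list contains
--     two list elements i places apart, whose distance
--     as integers is also i.
--
--     :param ints: a list of integers
--     :returns: a boolean value if ints contains two
--     elements as described above.
--
--     :Example:
--     >>> same_diff_ints([5,3,1,5,9,8])
--     True
--     >>> same_diff_ints([1,3,5,7,9])
--     False
--     """
--     if len(ints) == 0:
--         return False
--     for i in range(1, len(ints)): #represent num of places apart
--         for j in range(len(ints)): #iterate through each element in list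
--             if j + i >= len(ints): #no more elems to look at for this iteration
--                 break
--             elif abs(ints[j] - ints[j + i]) == i: #equal places and distances
--                 return True
--     return False
-- ===== SOURCE B (Python) =====
-- def same_diff_ints(ints):
--     plus = set()
--     minus = set()
--     for idx, v in enumerate(ints):
--         if v + idx in plus or v - idx in minus:
--             return True
--         plus.add(v + idx)
--         minus.add(v - idx)
--     return False
-- ===== Notes on version B (the rewrite author's own statement) =====
-- stated objective: faster
-- what changed: Replaces A's nested scan over all gaps i and positions j by a single pass that keeps hash sets of v+idx and v-idx seen so far and reports a pair as soon as the current element's v+idx or v-idx was already seen.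
import Mathlib
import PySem

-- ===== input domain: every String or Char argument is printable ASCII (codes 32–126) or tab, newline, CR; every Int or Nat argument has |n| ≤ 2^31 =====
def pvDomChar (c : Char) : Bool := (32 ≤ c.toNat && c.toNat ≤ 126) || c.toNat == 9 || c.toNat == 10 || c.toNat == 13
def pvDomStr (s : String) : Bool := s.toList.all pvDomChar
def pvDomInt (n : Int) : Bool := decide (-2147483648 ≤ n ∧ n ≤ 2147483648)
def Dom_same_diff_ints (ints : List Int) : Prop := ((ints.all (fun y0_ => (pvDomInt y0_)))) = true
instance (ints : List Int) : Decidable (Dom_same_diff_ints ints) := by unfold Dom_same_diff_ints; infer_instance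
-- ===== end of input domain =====

-- B replaces A's nested O(n^2) pair scan by one pass keeping sets of v+idx and v-idx (objective: faster, asymptotic).

-- ===== PORT A =====
-- inner loop: for j in range(len(ints)): break / return True / continue
def sdiInner (ints : List Int) (L i j : Nat) : Bool :=
  if _h : j < L then
    if L ≤ j + i then false
    else if (PySem.List.pyGetD ints (j : Int) 0 - PySem.List.pyGetD ints ((j + i : Nat) : Int) 0).natAbs = i then true
    else sdiInner ints L i (j + 1)
  else false
termination_by L - j

-- outer loop: for i in range(1, len(ints))
def sdiOuter (ints : List Int) (L i : Nat) : Bool :=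
  if _h : i < L then
    if sdiInner ints L i 0 then true else sdiOuter ints L (i + 1)
  else false
termination_by L - i

def same_diff_ints (ints : List Int) : Bool :=
  if ints.length == 0 then false else sdiOuter ints ints.length 1

-- ===== PORT B =====
-- one pass over enumerate(ints), carrying the sets {v+idx} and {v-idx} of earlier elements
def sdiLoop (plus minus : PySem.Set Int) (idx : Nat) : List Int → Bool
  | [] => false
  | v :: rest =>
    if PySem.Set.contains plus (v + (idx : Int)) || PySem.Set.contains minus (v - (idx : Int)) then true
    else sdiLoop (PySem.Set.add plus (v + (idx : Int))) (PySem.Set.add minus (v - (idx : Int))) (idx + 1) rest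

def same_diff_ints_alt (ints : List Int) : Bool :=
  sdiLoop PySem.Set.empty PySem.Set.empty 0 ints

-- ===== PRECONDITION & SPEC =====
def Spec_same_diff_ints (ints : List Int) (out : Bool) : Prop := out = same_diff_ints_alt ints
instance (ints : List Int) (out : Bool) : Decidable (Spec_same_diff_ints ints out) := by unfold Spec_same_diff_ints; infer_instance

-- ===== CLAIM (what is proved, stated in full; the proofs are below) =====
def Claim_equal_same_diff_ints : Prop := ∀ (ints : List Int), Dom_same_diff_ints ints → Spec_same_diff_ints ints (same_diff_ints ints)

-- ===== LEMMAS AND PROOFS =====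

-- the common characterisation: two elements d places apart whose distance is d
def sdiE (ints : List Int) : Prop :=
  ∃ d k : Nat, 1 ≤ d ∧ k + d < ints.length ∧ (ints.getD k 0 - ints.getD (k + d) 0).natAbs = d

lemma sdiInner_iff (ints : List Int) (L i : Nat) :
    ∀ n j, L - j ≤ n →
      (sdiInner ints L i j = true ↔
        ∃ k, j ≤ k ∧ k + i < L ∧ (ints.getD k 0 - ints.getD (k + i) 0).natAbs = i) := by
  intro n
  induction n with
  | zero =>
    intro j hj
    rw [sdiInner]
    have hLj : L ≤ j := by omega
    simp only [dif_neg (by omega : ¬ j < L)]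
    constructor
    · intro h; exact absurd h (by simp)
    · rintro ⟨k, hk1, hk2, _⟩; omega
  | succ n ih =>
    intro j hj
    rw [sdiInner]
    by_cases hjL : j < L
    · simp only [dif_pos hjL]
      by_cases hbr : L ≤ j + i
      · simp only [if_pos hbr]
        constructor
        · intro h; exact absurd h (by simp)
        · rintro ⟨k, hk1, hk2, _⟩; omega
      · simp only [if_neg hbr]
        by_cases hc : (PySem.List.pyGetD ints (j : Int) 0 - PySem.List.pyGetD ints ((j + i : Nat) : Int) 0).natAbs = i
        · rw [if_pos hc]
          simp only [PySem.List.pyGetD_natCast] at hc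
          simp only [true_iff]
          exact ⟨j, le_refl j, by omega, hc⟩
        · simp only [if_neg hc]
          simp only [PySem.List.pyGetD_natCast] at hc
          rw [ih (j + 1) (by omega)]
          constructor
          · rintro ⟨k, hk1, hk2, hk3⟩; exact ⟨k, by omega, hk2, hk3⟩
          · rintro ⟨k, hk1, hk2, hk3⟩
            refine ⟨k, ?_, hk2, hk3⟩
            rcases Nat.eq_or_lt_of_le hk1 with h | h
            · exact absurd (h ▸ hk3) hc
            · omega
    · simp only [dif_neg hjL]
      constructor
      · intro h; exact absurd h (by simp)
      · rintro ⟨k, hk1, hk2, _⟩; omega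

lemma sdiOuter_iff (ints : List Int) (L : Nat) :
    ∀ n i, L - i ≤ n →
      (sdiOuter ints L i = true ↔
        ∃ d k, i ≤ d ∧ k + d < L ∧ (ints.getD k 0 - ints.getD (k + d) 0).natAbs = d) := by
  intro n
  induction n with
  | zero =>
    intro i hi
    rw [sdiOuter]
    simp only [dif_neg (by omega : ¬ i < L)]
    constructor
    · intro h; exact absurd h (by simp)
    · rintro ⟨d, k, h1, h2, _⟩; omega
  | succ n ih =>
    intro i hi
    rw [sdiOuter]
    by_cases hiL : i < L
    · simp only [dif_pos hiL]
      by_cases hin : sdiInner ints L i 0 = true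
      · simp only [if_pos hin]
        rcases (sdiInner_iff ints L i L 0 (by omega)).mp hin with ⟨k, _, hk2, hk3⟩
        simp only [true_iff]
        exact ⟨i, k, le_refl i, hk2, hk3⟩
      · simp only [if_neg hin]
        rw [ih (i + 1) (by omega)]
        constructor
        · rintro ⟨d, k, h1, h2, h3⟩; exact ⟨d, k, by omega, h2, h3⟩
        · rintro ⟨d, k, h1, h2, h3⟩
          refine ⟨d, k, ?_, h2, h3⟩
          rcases Nat.eq_or_lt_of_le h1 with h | h
          · exact absurd ((sdiInner_iff ints L i L 0 (by omega)).mpr ⟨k, Nat.zero_le k, h ▸ h2, h ▸ h3⟩) hin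
          · omega
    · simp only [dif_neg hiL]
      constructor
      · intro h; exact absurd h (by simp)
      · rintro ⟨d, k, h1, h2, _⟩; omega

lemma same_diff_ints_iff (ints : List Int) : same_diff_ints ints = true ↔ sdiE ints := by
  unfold same_diff_ints sdiE
  by_cases hL : ints.length = 0
  · simp only [hL]
    constructor
    · intro h; exact absurd h (by simp)
    · rintro ⟨d, k, h1, h2, _⟩; omega
  · simp only [beq_iff_eq, if_neg hL]
    exact sdiOuter_iff ints ints.length ints.length 1 (by omega)

lemma sdiLoop_iff (l : List Int) :
    ∀ (plus minus : PySem.Set Int) (idx : Nat),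
      (sdiLoop plus minus idx l = true ↔
        ∃ k, k < l.length ∧
          ((l.getD k 0 + ((idx + k : Nat) : Int)) ∈ plus ∨
           (l.getD k 0 - ((idx + k : Nat) : Int)) ∈ minus ∨
           ∃ p, p < k ∧
             (l.getD k 0 + ((idx + k : Nat) : Int) = l.getD p 0 + ((idx + p : Nat) : Int) ∨
              l.getD k 0 - ((idx + k : Nat) : Int) = l.getD p 0 - ((idx + p : Nat) : Int)))) := by
  induction l with
  | nil =>
    intro plus minus idx
    simp [sdiLoop]
  | cons v rest ih =>
    intro plus minus idx
    rw [sdiLoop]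
    by_cases hhd : (PySem.Set.contains plus (v + (idx : Int)) || PySem.Set.contains minus (v - (idx : Int))) = true
    · simp only [if_pos hhd, true_iff]
      rcases Bool.or_eq_true_iff.mp hhd with h | h
      · exact ⟨0, by simp, Or.inl (by simpa using (PySem.Set.contains_iff plus _).mp h)⟩
      · exact ⟨0, by simp, Or.inr (Or.inl (by simpa using (PySem.Set.contains_iff minus _).mp h))⟩
    · simp only [if_neg hhd]
      have hp : v + (idx : Int) ∉ plus := by
        intro hm
        exact hhd (Bool.or_eq_true_iff.mpr (Or.inl ((PySem.Set.contains_iff plus _).mpr hm)))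
      have hm : v - (idx : Int) ∉ minus := by
        intro hmm
        exact hhd (Bool.or_eq_true_iff.mpr (Or.inr ((PySem.Set.contains_iff minus _).mpr hmm)))
      rw [ih _ _ (idx + 1)]
      constructor
      · rintro ⟨k, hk, hcase⟩
        refine ⟨k + 1, by simpa using hk, ?_⟩
        have hg : (v :: rest).getD (k + 1) 0 = rest.getD k 0 := rfl
        have hcast : ((idx + (k + 1) : Nat) : Int) = ((idx + 1 + k : Nat) : Int) := by omega
        rcases hcase with hc | hc | ⟨p, hpk, hc⟩
        · rcases (PySem.Set.mem_add _ _ _).mp hc with hc' | hc'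
          · exact Or.inl (by rw [hg, hcast]; exact hc')
          · exact Or.inr (Or.inr ⟨0, by omega, Or.inl (by rw [hg, hcast]; simpa using hc')⟩)
        · rcases (PySem.Set.mem_add _ _ _).mp hc with hc' | hc'
          · exact Or.inr (Or.inl (by rw [hg, hcast]; exact hc'))
          · exact Or.inr (Or.inr ⟨0, by omega, Or.inr (by rw [hg, hcast]; simpa using hc')⟩)
        · refine Or.inr (Or.inr ⟨p + 1, by omega, ?_⟩)
          have hg' : (v :: rest).getD (p + 1) 0 = rest.getD p 0 := rfl
          have hcast' : ((idx + (p + 1) : Nat) : Int) = ((idx + 1 + p : Nat) : Int) := by omega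
          rcases hc with hc | hc
          · exact Or.inl (by rw [hg, hcast, hg', hcast']; exact hc)
          · exact Or.inr (by rw [hg, hcast, hg', hcast']; exact hc)
      · rintro ⟨k, hk, hcase⟩
        match k with
        | 0 =>
          exfalso
          rcases hcase with hc | hc | ⟨p, hpk, _⟩
          · exact hp (by simpa using hc)
          · exact hm (by simpa using hc)
          · omega
        | k + 1 =>
          refine ⟨k, by simpa using hk, ?_⟩
          have hg : (v :: rest).getD (k + 1) 0 = rest.getD k 0 := rfl
          have hcast : ((idx + (k + 1) : Nat) : Int) = ((idx + 1 + k : Nat) : Int) := by omega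
          rcases hcase with hc | hc | ⟨p, hpk, hc⟩
          · exact Or.inl ((PySem.Set.mem_add _ _ _).mpr (Or.inl (by rw [hg, hcast] at hc; exact hc)))
          · exact Or.inr (Or.inl ((PySem.Set.mem_add _ _ _).mpr (Or.inl (by rw [hg, hcast] at hc; exact hc))))
          · match p with
            | 0 =>
              rw [hg, hcast] at hc
              rcases hc with hc | hc
              · exact Or.inl ((PySem.Set.mem_add _ _ _).mpr (Or.inr (by simpa using hc)))
              · exact Or.inr (Or.inl ((PySem.Set.mem_add _ _ _).mpr (Or.inr (by simpa using hc))))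
            | p + 1 =>
              have hg' : (v :: rest).getD (p + 1) 0 = rest.getD p 0 := rfl
              have hcast' : ((idx + (p + 1) : Nat) : Int) = ((idx + 1 + p : Nat) : Int) := by omega
              rw [hg, hcast, hg', hcast'] at hc
              exact Or.inr (Or.inr ⟨p, by omega, hc⟩)

lemma same_diff_ints_alt_iff (ints : List Int) : same_diff_ints_alt ints = true ↔ sdiE ints := by
  unfold same_diff_ints_alt sdiE
  rw [sdiLoop_iff ints PySem.Set.empty PySem.Set.empty 0]
  constructor
  · rintro ⟨k, hk, hc | hc | ⟨p, hpk, hc⟩⟩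
    · exact absurd hc (by simp [PySem.Set.empty])
    · exact absurd hc (by simp [PySem.Set.empty])
    · refine ⟨k - p, p, by omega, by omega, ?_⟩
      have hkp : p + (k - p) = k := by omega
      rw [hkp]
      rcases hc with hc | hc
      · omega
      · omega
  · rintro ⟨d, k, hd, hkd, habs⟩
    refine ⟨k + d, by omega, Or.inr (Or.inr ⟨k, by omega, ?_⟩)⟩
    have h := Int.natAbs_eq (ints.getD k 0 - ints.getD (k + d) 0)
    rw [habs] at h
    rcases h with h | h
    · exact Or.inl (by omega)
    · exact Or.inr (by omega)

-- ===== VERDICT (by name: the statement is the Claim_ definition above) =====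
theorem same_diff_ints_spec : Claim_equal_same_diff_ints := by
  intro ints _
  unfold Spec_same_diff_ints
  have h1 := same_diff_ints_iff ints
  have h2 := same_diff_ints_alt_iff ints
  cases hA : same_diff_ints ints <;> cases hB : same_diff_ints_alt ints <;> simp_all
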